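-- pv_equiv track=rewrite | github.com/eltrai/algsContests | GoogleCodeJam/2018/Qual/A-SavingTheUniverseAgain/A.py | damage
-- ===== SOURCE A (Python) =====
-- def damage(sequence):
--     d = 1
--     td = 0
--     for l in sequence:
--         if l == 'S':
--             td += d
--         else:
--             d*=2
--     return td
-- ===== SOURCE B (Python) =====
-- def damage(sequence):
--     total = 0
--     for i, ch in enumerate(sequence):
--         if ch == 'S':
--             total += 2 ** sum(1 for c in sequence[:i] if c != 'S')
--     return total
-- ===== Notes on version B (the rewrite author's own statement) =====
-- stated objective: alternative
-- what changed: Replaces the single pass with a running doubling multiplier by a per-'S' closed form: each 'S' contributes 2 to the power of the number of non-'S' characters before it, computed by re-scanning the prefix.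
import Mathlib
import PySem

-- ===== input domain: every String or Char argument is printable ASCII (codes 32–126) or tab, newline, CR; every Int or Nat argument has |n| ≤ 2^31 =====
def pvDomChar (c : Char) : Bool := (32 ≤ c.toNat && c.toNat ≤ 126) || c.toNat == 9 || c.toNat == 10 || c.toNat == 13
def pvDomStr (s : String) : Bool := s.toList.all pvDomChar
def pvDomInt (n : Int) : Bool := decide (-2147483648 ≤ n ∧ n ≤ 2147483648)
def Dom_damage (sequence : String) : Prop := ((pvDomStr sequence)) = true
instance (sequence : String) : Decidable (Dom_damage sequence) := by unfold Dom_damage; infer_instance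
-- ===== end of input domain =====

-- B replaces A's running doubling multiplier by a per-'S' closed form (2^#non-'S' in the prefix, re-scanned); objective: alternative decomposition, not faster.


-- ===== PORT A =====
def damage (sequence : String) : Int :=
  (sequence.toList.foldl
    (fun (st : Int × Int) l => if l = 'S' then (st.1, st.2 + st.1) else (st.1 * 2, st.2))
    (1, 0)).2

-- ===== PORT B =====
def damage_alt (sequence : String) : Int :=
  (PySem.List.enumerate sequence.toList 0).foldl
    (fun (acc : Int) p =>
      if p.2 = 'S' then
        acc + 2 ^ ((PySem.List.slice sequence.toList none (some p.1)).filter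
                     (fun c => decide (c ≠ 'S'))).length
      else acc) 0

-- ===== PRECONDITION & SPEC =====
def Spec_damage (sequence : String) (out : Int) : Prop := out = damage_alt sequence
instance (sequence : String) (out : Int) : Decidable (Spec_damage sequence out) := by unfold Spec_damage; infer_instance

-- ===== CLAIM (what is proved, stated in full; the proofs are below) =====
def Claim_equal_damage : Prop := ∀ (sequence : String), Dom_damage sequence → Spec_damage sequence (damage sequence)

-- ===== LEMMAS AND PROOFS =====

/-- Common reference value: sum over 'S' chars of 2^(non-'S' chars before). -/
def specSum : List Char → Int
  | [] => 0
  | c :: cs => if c = 'S' then 1 + specSum cs else 2 * specSum cs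

theorem damage_fold_eq (xs : List Char) : ∀ (d td : Int),
    (xs.foldl
      (fun (st : Int × Int) l => if l = 'S' then (st.1, st.2 + st.1) else (st.1 * 2, st.2))
      (d, td)).2 = td + d * specSum xs := by
  induction xs with
  | nil => intro d td; simp [specSum]
  | cons c cs ih =>
    intro d td
    by_cases h : c = 'S' <;> simp [List.foldl, h, specSum, ih] <;> ring

theorem damage_alt_fold_eq (xs : List Char) : ∀ (orig : List Char) (n : Nat) (acc : Int),
    orig.drop n = xs →
    (PySem.List.enumerate xs (n : Int)).foldl
      (fun (acc : Int) p =>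
        if p.2 = 'S' then
          acc + 2 ^ ((PySem.List.slice orig none (some p.1)).filter
                       (fun c => decide (c ≠ 'S'))).length
        else acc) acc
      = acc + 2 ^ ((orig.take n).filter (fun c => decide (c ≠ 'S'))).length * specSum xs := by
  induction xs with
  | nil => intro orig n acc _; simp [PySem.List.enumerate_nil, specSum]
  | cons c cs ih =>
    intro orig n acc h
    have hget : orig[n]? = some c := by
      have : (orig.drop n)[0]? = orig[n]? := by simp
      rw [h] at this; simpa using this.symm
    have htake : orig.take (n + 1) = orig.take n ++ [c] := by
      rw [List.take_add_one, hget]; rfl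
    have hdrop : orig.drop (n + 1) = cs := by
      have : orig.drop (n + 1) = (orig.drop n).drop 1 := by
        rw [List.drop_drop]
      rw [this, h]; rfl
    have hcast : (n : Int) + 1 = ((n + 1 : Nat) : Int) := by push_cast; ring
    rw [PySem.List.enumerate_cons, List.foldl_cons, hcast, ih orig (n + 1) _ hdrop]
    by_cases hc : c = 'S'
    · simp only [hc, htake, PySem.List.slice_to_natCast, specSum,
        List.filter_append]
      simp [hc]
      ring
    · simp only [htake, specSum, if_neg hc, List.filter_append]
      simp [hc, pow_succ]
      ring

-- ===== VERDICT (by name: the statement is the Claim_ definition above) =====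
theorem damage_spec : Claim_equal_damage := by
  intro s _
  unfold Spec_damage damage damage_alt
  have hA := damage_fold_eq s.toList 1 0
  have hB := damage_alt_fold_eq s.toList s.toList 0 0 (by simp)
  simp only [Nat.cast_zero] at hB
  rw [hA, hB]
  simp
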